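-- pv_equiv track=rewrite | github.com/mtlh01p/private-affairs | school/SC1003 - Computational Thinking/T9/Tutorial11A.py | length12helper
-- ===== SOURCE A (Python) =====
-- def length12helper(arr, num):
--     if len(arr) == 1:
--         num += 1
--     else:
--         num += 1
--         k = length12helper(arr[1:], num)
--         return k
--     return num
-- ===== SOURCE B (Python) =====
-- def length12helper(arr, num):
--     # closed form: the recursion adds 1 per element
--     return num + len(arr)
-- ===== Notes on version B (the rewrite author's own statement) =====
-- stated objective: faster
-- what changed: Replaced the O(n^2) tail recursion (which slices the list each step and adds 1 per element) with the closed form num + len(arr).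
import Mathlib
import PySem

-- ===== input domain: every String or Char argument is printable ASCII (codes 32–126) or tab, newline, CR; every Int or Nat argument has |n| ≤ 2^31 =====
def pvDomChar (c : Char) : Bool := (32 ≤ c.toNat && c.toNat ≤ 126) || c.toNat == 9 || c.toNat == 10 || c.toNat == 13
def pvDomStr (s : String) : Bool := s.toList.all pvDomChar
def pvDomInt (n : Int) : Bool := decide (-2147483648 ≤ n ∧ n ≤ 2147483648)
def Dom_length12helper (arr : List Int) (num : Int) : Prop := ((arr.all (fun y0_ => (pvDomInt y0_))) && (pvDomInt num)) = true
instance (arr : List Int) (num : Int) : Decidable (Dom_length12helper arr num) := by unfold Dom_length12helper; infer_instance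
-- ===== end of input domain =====

-- B replaces A's per-element tail recursion with the closed form num + len(arr); B returns num on [] where A raises.

-- ===== PORT A =====
-- A recurses on arr[1:] until len(arr) == 1; on [] Python never terminates (RecursionError),
-- excluded by Pre_; the Lean [] case returns num only to make the function total.
def length12helper (arr : List Int) (num : Int) : Int :=
  match arr with
  | [] => num
  | [_] => num + 1
  | _ :: rest => length12helper rest (num + 1)

-- ===== PORT B =====
def length12helper_alt (arr : List Int) (num : Int) : Int :=
  num + arr.length

-- ===== PRECONDITION & SPEC =====
-- Pre_ excludes arr = [], on which the Python A raises RecursionError (infinite recursion).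
def Pre_length12helper (arr : List Int) (num : Int) : Prop := arr ≠ []
instance (arr : List Int) (num : Int) : Decidable (Pre_length12helper arr num) := by unfold Pre_length12helper; infer_instance
def pvWitness_length12helper : List Int × Int := ([3, 4, 5], 10)

def Spec_length12helper (arr : List Int) (num : Int) (out : Int) : Prop := out = length12helper_alt arr num
instance (arr : List Int) (num : Int) (out : Int) : Decidable (Spec_length12helper arr num out) := by unfold Spec_length12helper; infer_instance

-- ===== CLAIM (what is proved, stated in full; the proofs are below) =====
def Claim_equal_length12helper : Prop := ∀ (arr : List Int) (num : Int), Dom_length12helper arr num → Pre_length12helper arr num → Spec_length12helper arr num (length12helper arr num)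

-- ===== LEMMAS AND PROOFS =====
theorem length12helper_eq_closed (arr : List Int) (num : Int) (h : arr ≠ []) :
    length12helper arr num = num + arr.length := by
  induction arr generalizing num with
  | nil => exact absurd rfl h
  | cons x rest ih =>
    cases rest with
    | nil => simp [length12helper]
    | cons y t =>
      rw [show length12helper (x :: y :: t) num = length12helper (y :: t) (num + 1) from rfl,
        ih (num + 1) (by simp)]
      simp; ring

-- ===== VERDICT (by name: the statement is the Claim_ definition above) =====
theorem length12helper_spec : Claim_equal_length12helper := by
  intro arr num _ hpre
  unfold Spec_length12helper length12helper_alt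
  exact length12helper_eq_closed arr num hpre
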